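-- pv_equiv track=rewrite | github.com/sabuj292/leetcode-solutions | Contest leetcode/weekly_contest_461/q2_accepted.py | maxBalancedShipments
-- ===== SOURCE A (Python) =====
-- def maxBalancedShipments(weight):
--         n = len(weight)
--         count = 0
--         i = 0
--
--         while i < n:
--             cur_max = weight[i]
--             j = i + 1
--             found = False
--
--             while j < n:
--                 cur_max = max(cur_max, weight[j])
--                 if weight[j] < cur_max:
--                     count += 1
--                     i = j + 1  # start next shipment after j
--                     found = True
--                     break
--                 j += 1
--
--             if not found:
--                 break  # no more balanced shipment possible
--         return count
-- ===== SOURCE B (Python) =====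
-- def maxBalancedShipments(weight):
--     # Stage 1: positions of adjacent strict descents (weight[k] < weight[k-1]).
--     descents = [k for k, (a, b) in enumerate(zip(weight, weight[1:]), start=1) if b < a]
--     # Stage 2: greedily select descents left to right, requiring a gap of >= 2
--     # (a counted descent at k consumes position k, and the next shipment starts at k+1,
--     # so its first countable descent is at k+2).
--     count = 0
--     barrier = 1
--     for k in descents:
--         if k >= barrier:
--             count += 1
--             barrier = k + 2
--     return count
-- ===== Notes on version B (the rewrite author's own statement) =====
-- stated objective: alternative
-- what changed: Replaced A's nested while-loops with running max and index jumping by a two-stage algorithm: first enumerate all adjacent strict-descent positions (weight[k] < weight[k-1]), then greedily select descents left to right with a gap of at least 2; this works because within a shipment A's scanned prefix is non-decreasing, so the break happens exactly at the first adjacent descent, and the next shipment's first countable descent is two positions later.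
import Mathlib
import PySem

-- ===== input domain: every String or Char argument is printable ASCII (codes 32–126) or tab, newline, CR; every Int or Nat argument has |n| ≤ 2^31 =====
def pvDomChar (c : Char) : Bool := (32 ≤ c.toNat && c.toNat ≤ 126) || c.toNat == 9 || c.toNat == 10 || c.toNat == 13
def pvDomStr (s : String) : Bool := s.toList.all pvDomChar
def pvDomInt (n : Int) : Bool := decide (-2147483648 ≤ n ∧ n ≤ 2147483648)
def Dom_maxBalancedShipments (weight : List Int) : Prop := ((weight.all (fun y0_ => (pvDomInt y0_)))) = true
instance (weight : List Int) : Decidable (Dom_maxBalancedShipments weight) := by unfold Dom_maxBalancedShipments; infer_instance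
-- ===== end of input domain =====

-- B replaces A's running-max scan with nested while-loops by a two-stage algorithm:
-- first list all adjacent strict-descent positions, then greedily select them with gap ≥ 2; objective: alternative.

-- ===== PORT A =====
-- inner `while j < n` loop of A: returns `some j` at the break (weight[j] < cur_max), none if the loop
-- runs off the end; fuel ≥ n - j bounds the remaining iterations (a totality guard only)
def pvInnerA (weight : List Int) (curMax : Int) (j : Nat) : Nat → Option Nat
  | 0 => none
  | fuel + 1 =>
    if h : j < weight.length then
      if weight[j] < max curMax weight[j] then some j
      else pvInnerA weight (max curMax weight[j]) (j + 1) fuel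
    else none

-- outer `while i < n` loop of A; fuel bounds the remaining iterations (a totality guard only)
def pvOuterA (weight : List Int) (count : Int) (i : Nat) : Nat → Int
  | 0 => count
  | fuel + 1 =>
    if h : i < weight.length then
      match pvInnerA weight weight[i] (i + 1) (weight.length - (i + 1)) with
      | some j => pvOuterA weight (count + 1) (j + 1) fuel
      | none => count
    else count

def maxBalancedShipments (weight : List Int) : Int := pvOuterA weight 0 0 weight.length

-- ===== PORT B =====
-- stage 2 step: greedy selection of descent positions with the barrier rule
def pvGreedyStep (s : Int × Nat) (k : Nat) : Int × Nat :=
  if k ≥ s.2 then (s.1 + 1, k + 2) else s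

def maxBalancedShipments_alt (weight : List Int) : Int :=
  -- stage 1: [k for k, (a, b) in enumerate(zip(weight, weight[1:]), start=1) if b < a]
  let descents : List Nat :=
    ((weight.zip (weight.drop 1)).zipIdx 1).filterMap
      (fun p => if p.1.2 < p.1.1 then some p.2 else none)
  (descents.foldl pvGreedyStep (0, 1)).1

-- ===== PRECONDITION & SPEC =====
def Spec_maxBalancedShipments (weight : List Int) (out : Int) : Prop := out = maxBalancedShipments_alt weight
instance (weight : List Int) (out : Int) : Decidable (Spec_maxBalancedShipments weight out) := by unfold Spec_maxBalancedShipments; infer_instance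

-- ===== CLAIM (what is proved, stated in full; the proofs are below) =====
def Claim_equal_maxBalancedShipments : Prop := ∀ (weight : List Int), Dom_maxBalancedShipments weight → Spec_maxBalancedShipments weight (maxBalancedShipments weight)

-- ===== LEMMAS AND PROOFS =====

-- proof-side flat one-pass description of A: state = (count, optional current segment max)
def pvFlatStep (s : Int × Option Int) (w : Int) : Int × Option Int :=
  match s.2 with
  | none => (s.1, some w)
  | some m => if w ≥ m then (s.1, some w) else (s.1 + 1, none)

-- proof-side recursive form of B's stage 1: descent positions of l, indices starting at s
def pvDfrom : List Int → Nat → List Nat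
  | a :: x :: rest, s => if x < a then s :: pvDfrom (x :: rest) (s + 1) else pvDfrom (x :: rest) (s + 1)
  | _, _ => []

-- B's zip/zipIdx/filterMap stage 1 equals the recursive form
theorem pvDescents_eq (l : List Int) (s : Nat) :
    ((l.zip (l.drop 1)).zipIdx s).filterMap
      (fun p => if p.1.2 < p.1.1 then some p.2 else none) = pvDfrom l s := by
  induction l, s using pvDfrom.induct with
  | case1 a x rest s hlt ih =>
    simp only [List.drop_succ_cons, List.drop_zero, List.zip_cons_cons, List.zipIdx_cons,
      List.filterMap_cons]
    rw [if_pos hlt]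
    rw [show pvDfrom (a :: x :: rest) s = s :: pvDfrom (x :: rest) (s + 1) from by
      rw [pvDfrom]; rw [if_pos hlt]]
    exact congrArg (List.cons s) (by simpa using ih)
  | case2 a x rest s hlt ih =>
    simp only [List.drop_succ_cons, List.drop_zero, List.zip_cons_cons, List.zipIdx_cons,
      List.filterMap_cons]
    rw [if_neg hlt]
    rw [show pvDfrom (a :: x :: rest) s = pvDfrom (x :: rest) (s + 1) from by
      rw [pvDfrom]; rw [if_neg hlt]]
    simpa using ih
  | case3 l s h1 =>
    match l with
    | [] => simp [pvDfrom]
    | [a] => simp [pvDfrom]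
    | a :: x :: rest => exact absurd rfl (h1 a x rest)

-- core correspondence: flat fold inside a segment with current max a equals the greedy
-- fold over the descent positions of (a :: l), for any barrier b ≤ s
theorem pvSeg (n : Nat) : ∀ (l : List Int), l.length ≤ n → ∀ (a : Int) (s : Nat) (c : Int) (b : Nat),
    b ≤ s → (l.foldl pvFlatStep (c, some a)).1 =
      ((pvDfrom (a :: l) s).foldl pvGreedyStep (c, b)).1 := by
  induction n with
  | zero =>
    intro l hl a s c b hb
    have : l = [] := List.eq_nil_of_length_eq_zero (Nat.le_zero.mp hl)
    subst this
    simp [pvDfrom]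
  | succ n ih =>
    intro l hl a s c b hb
    match l with
    | [] => simp [pvDfrom]
    | x :: rest =>
      by_cases hx : x < a
      · -- descent between a and x at position s: counted
        have hxa : ¬ x ≥ a := by omega
        simp only [List.foldl_cons, pvFlatStep, if_neg hxa]
        show ((rest.foldl pvFlatStep (c + 1, none)).1 = _)
        rw [show pvDfrom (a :: x :: rest) s = s :: pvDfrom (x :: rest) (s + 1) from by
          rw [pvDfrom]; rw [if_pos hx]]
        simp only [List.foldl_cons, pvGreedyStep, if_pos (show s ≥ b from hb)]
        match rest with
        | [] => simp [pvDfrom]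
        | y :: r2 =>
          simp only [List.foldl_cons, pvFlatStep]
          show ((r2.foldl pvFlatStep (c + 1, some y)).1 = _)
          have hmain := ih r2 (by simp at hl ⊢; omega) y (s + 2) (c + 1) (s + 2) (Nat.le_refl _)
          rw [hmain]
          -- the possible descent at s+1 (between x and y) is below the barrier s+2: skipped
          by_cases hy : y < x
          · rw [show pvDfrom (x :: y :: r2) (s + 1) = (s + 1) :: pvDfrom (y :: r2) (s + 2) from by
              rw [pvDfrom]; rw [if_pos hy]]
            simp only [List.foldl_cons, pvGreedyStep]
            rw [if_neg (by omega)]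
          · rw [show pvDfrom (x :: y :: r2) (s + 1) = pvDfrom (y :: r2) (s + 2) from by
              rw [pvDfrom]; rw [if_neg hy]]
      · -- non-descent: segment continues with max x
        have hxa : x ≥ a := by omega
        simp only [List.foldl_cons, pvFlatStep, if_pos hxa]
        show ((rest.foldl pvFlatStep (c, some x)).1 = _)
        rw [ih rest (by simp at hl; omega) x (s + 1) c b (by omega)]
        rw [show pvDfrom (a :: x :: rest) s = pvDfrom (x :: rest) (s + 1) from by
          rw [pvDfrom]; rw [if_neg hx]]

-- ===== link between A and the flat fold (as in the straightforward one-pass view of A) =====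

-- the break index lies in [j, length)
theorem pvInnerA_some_bounds : ∀ (fuel : Nat) (weight : List Int) (curMax : Int) (j j' : Nat),
    pvInnerA weight curMax j fuel = some j' → j ≤ j' ∧ j' < weight.length := by
  intro fuel
  induction fuel with
  | zero => intro w m j j' h; simp [pvInnerA] at h
  | succ fuel ih =>
    intro w m j j' h
    rw [pvInnerA] at h
    by_cases hj : j < w.length
    · simp only [hj, dif_pos] at h
      by_cases hlt : w[j] < max m w[j]
      · rw [if_pos hlt] at h
        cases h
        exact ⟨Nat.le_refl _, hj⟩
      · rw [if_neg hlt] at h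
        have := ih w _ _ _ h
        omega
    · simp [hj] at h

-- folding the flat step from an in-segment state over the suffix from j agrees with A's inner loop
theorem pvInner_fold : ∀ (fuel : Nat) (weight : List Int) (curMax : Int) (j : Nat) (count : Int),
    weight.length ≤ j + fuel →
    ((weight.drop j).foldl pvFlatStep (count, some curMax)).1 =
      match pvInnerA weight curMax j fuel with
      | some j' => ((weight.drop (j' + 1)).foldl pvFlatStep (count + 1, none)).1
      | none => count := by
  intro fuel
  induction fuel with
  | zero =>
    intro w m j c hf
    rw [pvInnerA]
    simp [List.drop_eq_nil_of_le (by omega : w.length ≤ j)]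
  | succ fuel ih =>
    intro w m j c hf
    rw [pvInnerA]
    by_cases hj : j < w.length
    · simp only [hj, dif_pos]
      rw [List.drop_eq_getElem_cons hj, List.foldl_cons]
      by_cases hlt : w[j] < max m w[j]
      · have hwm : w[j] < m := by omega
        rw [if_pos hlt]
        simp [pvFlatStep, not_le.mpr hwm]
      · have hwm : m ≤ w[j] := by omega
        rw [if_neg hlt]
        have hmax : max m w[j] = w[j] := max_eq_right hwm
        have := ih w (max m w[j]) (j + 1) c (by omega)
        rw [hmax] at this
        simpa [pvFlatStep, hwm] using this
    · simp only [hj]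
      rw [List.drop_eq_nil_of_le (by omega : w.length ≤ j)]
      simp

-- folding the flat step from a between-segments state over the suffix from i agrees with A's outer loop
theorem pvOuter_fold : ∀ (fuel : Nat) (weight : List Int) (i : Nat) (count : Int),
    weight.length ≤ i + fuel →
    ((weight.drop i).foldl pvFlatStep (count, none)).1 = pvOuterA weight count i fuel := by
  intro fuel
  induction fuel with
  | zero =>
    intro w i c hf
    rw [pvOuterA]
    simp [List.drop_eq_nil_of_le (by omega : w.length ≤ i)]
  | succ fuel ih =>
    intro w i c hf
    rw [pvOuterA]
    by_cases hi : i < w.length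
    · simp only [hi, dif_pos]
      rw [List.drop_eq_getElem_cons hi, List.foldl_cons]
      simp only [pvFlatStep]
      rw [pvInner_fold (w.length - (i + 1)) w w[i] (i + 1) c (by omega)]
      cases hm : pvInnerA w w[i] (i + 1) (w.length - (i + 1)) with
      | some j =>
        have hb := pvInnerA_some_bounds _ w _ _ _ hm
        exact ih w (j + 1) (c + 1) (by omega)
      | none => rfl
    · simp only [hi]
      rw [List.drop_eq_nil_of_le (by omega : w.length ≤ i)]
      simp

-- ===== VERDICT (by name: the statement is the Claim_ definition above) =====
theorem maxBalancedShipments_spec : Claim_equal_maxBalancedShipments := by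
  intro weight _
  unfold Spec_maxBalancedShipments maxBalancedShipments maxBalancedShipments_alt
  rw [pvDescents_eq]
  rw [← pvOuter_fold weight.length weight 0 0 (by omega)]
  simp only [List.drop_zero]
  match weight with
  | [] => simp [pvDfrom]
  | x :: l =>
    simp only [List.foldl_cons, pvFlatStep]
    exact pvSeg l.length l (Nat.le_refl _) x 1 0 1 (Nat.le_refl _)
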